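-- pv_equiv track=rewrite | github.com/qeedquan/challenges | codewars/the-fibfusc-function-part-2.py | fibfusc
-- ===== SOURCE A (Python) =====
-- def fibfusc(n, d=None):
--     if n < 0:
--         return (0, 0)
--     if n == 0:
--         return (1, 0)
--     if n == 1:
--         return (0, 1)
--
--     m = 0
--     if d:
--         m = 10**d
--
--     x, y = 0, 1
--     for c in bin(n)[3:]:
--         a, b = x, y
--         t = 2*a + 3*b
--         if c == '0':
--             x, y = (a + b)*(a - b), b * t
--         else:
--             x, y = -b*t, (a + 2*b)*(a + 4*b)
--         if m != 0:
--             x, y = x%m, y%m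
--
--     if m != 0:
--         x, y = x%m, y%m
--         if n > 1 and x != 0:
--             return (x - m, y)
--
--     return (x, y)
-- ===== SOURCE B (Python) =====
-- def fibfusc(n, d=None):
--     if n < 0:
--         return (0, 0)
--     if n == 0:
--         return (1, 0)
--     m = 10**d if d else 0
--
--     # Fibonacci fast doubling: (F(k), F(k+1)), reduced mod m at each level when m != 0
--     def fib2(k):
--         if k == 0:
--             return (0, 1)
--         f, g = fib2(k // 2)
--         u = f * (2*g - f)
--         v = f*f + g*g
--         if k % 2:
--             u, v = v, u + v
--         if m != 0:
--             u, v = u % m, v % m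
--         return (u, v)
--
--     # fibfusc(n) = (-F(2n-2), F(2n)) for n >= 1
--     f, g = fib2(2*n - 2)
--     x, y = -f, f + g
--     if m != 0:
--         x, y = x % m, y % m
--         if n > 1 and x != 0:
--             return (x - m, y)
--     return (x, y)
-- ===== Notes on version B (the rewrite author's own statement) =====
-- stated objective: alternative
-- what changed: Replaces the bespoke bit-loop over bin(n)[3:] with Fibonacci fast doubling, using the identity fibfusc(n) = (-F(2n-2), F(2n)) for n >= 1, with the same per-level reduction mod 10**d.
-- outside the precondition, e.g. on fibfusc(1, -1): A returns (0, 1), B returns (0.0, 0.09999999999999995)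
import Mathlib
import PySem

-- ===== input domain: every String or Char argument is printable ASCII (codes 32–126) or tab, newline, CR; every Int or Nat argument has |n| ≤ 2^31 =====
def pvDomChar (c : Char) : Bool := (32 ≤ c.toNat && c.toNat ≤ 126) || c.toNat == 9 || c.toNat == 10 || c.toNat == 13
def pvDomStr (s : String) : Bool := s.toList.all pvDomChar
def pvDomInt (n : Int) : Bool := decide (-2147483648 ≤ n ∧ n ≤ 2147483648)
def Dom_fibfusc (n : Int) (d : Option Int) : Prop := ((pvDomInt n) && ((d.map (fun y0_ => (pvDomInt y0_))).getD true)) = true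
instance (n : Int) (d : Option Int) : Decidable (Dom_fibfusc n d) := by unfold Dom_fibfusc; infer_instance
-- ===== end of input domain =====

-- B replaces A's bespoke bit-loop over bin(n)[3:] by Fibonacci fast doubling,
-- using fibfusc(n) = (-F(2n-2), F(2n)) for n ≥ 1 (objective: alternative algorithm).

-- ===== PORT A =====
-- the characters of bin(k)[3:] for k ≥ 2 (and [] for k < 2): the binary digits of k below the top bit
def fibfuscBits (k : Nat) : List Char :=
  if _h : k < 2 then []
  else fibfuscBits (k / 2) ++ [if k % 2 == 1 then '1' else '0']
  decreasing_by omega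

-- one iteration of A's loop body
def fibfuscStepA (m : Int) (p : Int × Int) (c : Char) : Int × Int :=
  let a := p.1
  let b := p.2
  let t := 2*a + 3*b
  let q := if c == '0' then ((a + b)*(a - b), b * t) else (-b*t, (a + 2*b)*(a + 4*b))
  if m ≠ 0 then (PySem.Int.mod q.1 m, PySem.Int.mod q.2 m) else q

def fibfusc (n : Int) (d : Option Int) : Int × Int :=
  if n < 0 then (0, 0)
  else if n = 0 then (1, 0)
  else if n = 1 then (0, 1)
  else
    -- 'if d:' — truthy iff d is not None and d ≠ 0; 10**d ported for d ≥ 0 (Pre_ excludes d < 0, where Python yields floats)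
    let m : Int := match d with
      | none => 0
      | some dv => if dv ≠ 0 then 10 ^ dv.toNat else 0
    let p := (fibfuscBits n.toNat).foldl (fibfuscStepA m) (0, 1)
    if m ≠ 0 then
      let x := PySem.Int.mod p.1 m
      let y := PySem.Int.mod p.2 m
      if n > 1 ∧ x ≠ 0 then (x - m, y) else (x, y)
    else p

-- ===== PORT B =====
-- Source B's fib2: Fibonacci fast doubling, (F(k), F(k+1)) reduced mod m at each level when m ≠ 0
def fibfuscFib2 (m : Int) (k : Nat) : Int × Int :=
  if _h : k = 0 then (0, 1)
  else
    let r := fibfuscFib2 m (k / 2)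
    let f := r.1
    let g := r.2
    let u := f * (2*g - f)
    let v := f*f + g*g
    let q := if k % 2 == 1 then (v, u + v) else (u, v)
    if m ≠ 0 then (PySem.Int.mod q.1 m, PySem.Int.mod q.2 m) else q
  decreasing_by omega

def fibfusc_alt (n : Int) (d : Option Int) : Int × Int :=
  if n < 0 then (0, 0)
  else if n = 0 then (1, 0)
  else
    let m : Int := match d with
      | none => 0
      | some dv => if dv ≠ 0 then 10 ^ dv.toNat else 0
    let r := fibfuscFib2 m (2*n - 2).toNat
    let x := -r.1
    let y := r.1 + r.2
    if m ≠ 0 then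
      let x' := PySem.Int.mod x m
      let y' := PySem.Int.mod y m
      if n > 1 ∧ x' ≠ 0 then (x' - m, y') else (x', y')
    else (x, y)

-- ===== PRECONDITION & SPEC =====
-- Pre_ excludes d < 0 when n ≥ 1: there Python's 10**d is a float, so values outside Int × Int are returned (A for n ≥ 2, B for n ≥ 1).
def Pre_fibfusc (n : Int) (d : Option Int) : Prop := n ≤ 0 ∨ ∀ dv, d = some dv → 0 ≤ dv
instance (n : Int) (d : Option Int) : Decidable (Pre_fibfusc n d) := by unfold Pre_fibfusc; infer_instance

def pvWitness_fibfusc : Int × Option Int := (10, some 2)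

def Spec_fibfusc (n : Int) (d : Option Int) (out : Int × Int) : Prop := out = fibfusc_alt n d
instance (n : Int) (d : Option Int) (out : Int × Int) : Decidable (Spec_fibfusc n d out) := by unfold Spec_fibfusc; infer_instance

-- ===== CLAIM (what is proved, stated in full; the proofs are below) =====
def Claim_equal_fibfusc : Prop := ∀ (n : Int) (d : Option Int), Dom_fibfusc n d → Pre_fibfusc n d → Spec_fibfusc n d (fibfusc n d)

-- ===== LEMMAS AND PROOFS =====

-- integer Fibonacci
def ifib (k : Nat) : Int := (Nat.fib k : Int)

theorem ifib_zero : ifib 0 = 0 := rfl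
theorem ifib_one : ifib 1 = 1 := rfl
theorem ifib_two : ifib 2 = 1 := rfl

theorem ifib_add_two (k : Nat) : ifib (k + 2) = ifib k + ifib (k + 1) := by
  simp [ifib, Nat.fib_add_two]

theorem ifib_add (a b : Nat) : ifib (a + b + 1) = ifib a * ifib b + ifib (a+1) * ifib (b+1) := by
  simp only [ifib, Nat.fib_add]
  push_cast
  ring

theorem ifib_two_mul (j : Nat) : ifib (2*j) = ifib j * (2 * ifib (j+1) - ifib j) := by
  have hle : Nat.fib j ≤ 2 * Nat.fib (j+1) := le_trans Nat.fib_le_fib_succ (by omega)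
  simp only [ifib, Nat.fib_two_mul]
  push_cast [Nat.cast_sub hle]
  ring

theorem ifib_two_mul_add_one (j : Nat) : ifib (2*j + 1) = ifib j * ifib j + ifib (j+1) * ifib (j+1) := by
  simp only [ifib, Nat.fib_two_mul_add_one]
  push_cast
  ring

-- m > 0 turns Python % into Int.emod
theorem pymod_emod {a m : Int} (hm : 0 < m) : PySem.Int.mod a m = a % m :=
  PySem.Int.mod_eq_emod_of_pos hm

theorem emod_self_modeq (a m : Int) : (a % m) ≡ a [ZMOD m] :=
  Int.emod_emod_of_dvd a dvd_rfl

theorem one_emod_eq_one {m : Int} (hm : 2 ≤ m) : (1 : Int) % m = 1 :=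
  Int.emod_eq_of_lt (by omega) (by omega)

-- ---- B-side: value of the fast-doubling recursion ----

theorem fib2_exact : ∀ k, fibfuscFib2 0 k = (ifib k, ifib (k+1)) := by
  intro k
  induction k using Nat.strong_induction_on with
  | _ k ih =>
    by_cases h0 : k = 0
    · subst h0; simp [fibfuscFib2, ifib]
    · rw [fibfuscFib2, dif_neg h0, ih (k / 2) (by omega)]
      simp only [ne_eq, not_true_eq_false, if_false]
      rcases Nat.even_or_odd k with ⟨j, hj⟩ | ⟨j, hj⟩
      · have hk : k = 2 * j := by omega
        have hk2 : k / 2 = j := by omega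
        have hmod : (k % 2 == 1) = false := by subst hk; simp [Nat.mul_mod_right]
        subst hk
        simp only [hk2, hmod, if_false]
        refine Prod.ext ?_ ?_
        · simpa using (ifib_two_mul j).symm
        · simpa [ifib_two_mul_add_one j] using (add_comm (ifib j * ifib j) (ifib (j+1) * ifib (j+1)))
      · have hk : k = 2 * j + 1 := by omega
        have hk2 : k / 2 = j := by omega
        have hmod : (k % 2 == 1) = true := by subst hk; simp [Nat.add_mul_mod_self_left]
        subst hk
        simp only [hk2, hmod, if_true]
        refine Prod.ext ?_ ?_
        · simpa using (ifib_two_mul_add_one j).symm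
        · show ifib j * (2 * ifib (j+1) - ifib j) + (ifib j * ifib j + ifib (j+1) * ifib (j+1))
              = ifib (2*j + 1 + 1)
          rw [show 2*j + 1 + 1 = 2*j + 2 from rfl, ifib_add_two (2*j), ifib_two_mul, ifib_two_mul_add_one]

theorem fib2_mod {m : Int} (hm : 2 ≤ m) : ∀ k, fibfuscFib2 m k = (ifib k % m, ifib (k+1) % m) := by
  intro k
  have hm0 : (0:Int) < m := by omega
  have hmne : m ≠ 0 := by omega
  induction k using Nat.strong_induction_on with
  | _ k ih =>
    by_cases h0 : k = 0
    · subst h0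
      rw [fibfuscFib2]
      simp [ifib, one_emod_eq_one hm]
    · rw [fibfuscFib2, dif_neg h0, ih (k / 2) (by omega)]
      simp only [ne_eq, hmne, not_false_eq_true, if_true]
      set P := ifib (k/2) with hP
      set Q := ifib (k/2 + 1) with hQ
      have hp : (P % m) ≡ P [ZMOD m] := emod_self_modeq P m
      have hq : (Q % m) ≡ Q [ZMOD m] := emod_self_modeq Q m
      have hu : ((P % m) * (2*(Q % m) - (P % m))) ≡ (P * (2*Q - P)) [ZMOD m] :=
        hp.mul (((Int.ModEq.refl 2).mul hq).sub hp)
      have hv : ((P % m)*(P % m) + (Q % m)*(Q % m)) ≡ (P*P + Q*Q) [ZMOD m] :=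
        (hp.mul hp).add (hq.mul hq)
      rcases Nat.even_or_odd k with ⟨j, hj⟩ | ⟨j, hj⟩
      · have hk : k = 2 * j := by omega
        have hk2 : k / 2 = j := by omega
        have hmod : (k % 2 == 1) = false := by subst hk; simp [Nat.mul_mod_right]
        simp only [hmod, if_false]
        refine Prod.ext ?_ ?_
        · show PySem.Int.mod ((P % m) * (2*(Q % m) - (P % m))) m = ifib k % m
          rw [pymod_emod hm0, hu]
          rw [hP, hQ, hk2, hk, ← ifib_two_mul j]
        · show PySem.Int.mod ((P % m)*(P % m) + (Q % m)*(Q % m)) m = ifib (k+1) % m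
          rw [pymod_emod hm0, hv]
          rw [hP, hQ, hk2, hk, ← ifib_two_mul_add_one j]
      · have hk : k = 2 * j + 1 := by omega
        have hk2 : k / 2 = j := by omega
        have hmod : (k % 2 == 1) = true := by subst hk; simp [Nat.add_mul_mod_self_left]
        simp only [hmod, if_true]
        refine Prod.ext ?_ ?_
        · show PySem.Int.mod ((P % m)*(P % m) + (Q % m)*(Q % m)) m = ifib k % m
          rw [pymod_emod hm0, hv]
          rw [hP, hQ, hk2, hk, ← ifib_two_mul_add_one j]
        · show PySem.Int.mod ((P % m) * (2*(Q % m) - (P % m)) + ((P % m)*(P % m) + (Q % m)*(Q % m))) m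
              = ifib (k+1) % m
          rw [pymod_emod hm0, (hu.add hv)]
          rw [hP, hQ, hk2, hk]
          rw [show 2*j + 1 + 1 = 2*j + 2 from rfl, ifib_add_two (2*j), ifib_two_mul, ifib_two_mul_add_one]

-- ---- A-side: the raw (m = 0) loop body, applied to (-F(i), F(i+2)) ----

theorem stepA0_zero (i : Nat) :
    fibfuscStepA 0 (-(ifib i), ifib (i+2)) '0' = (-(ifib (2*i+2)), ifib (2*i+4)) := by
  have h2 : ifib (i+2) = ifib i + ifib (i+1) := ifib_add_two i
  have h3 : ifib (i+3) = ifib (i+1) + ifib (i+2) := ifib_add_two (i+1)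
  have e1 : ifib (2*i+2) = ifib i * ifib (i+1) + ifib (i+1) * ifib (i+2) := by
    have h := ifib_add i (i+1); rw [show i + (i+1) + 1 = 2*i+2 from by ring] at h; exact h
  have e2 : ifib (2*i+4) = ifib (i+1) * ifib (i+2) + ifib (i+2) * ifib (i+3) := by
    have h := ifib_add (i+1) (i+2); rw [show (i+1) + (i+2) + 1 = 2*i+4 from by ring] at h
    simpa [show i+1+1 = i+2 from rfl, show i+2+1 = i+3 from rfl] using h
  simp only [fibfuscStepA, ne_eq, not_true_eq_false, if_false, if_pos rfl]
  refine Prod.ext ?_ ?_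
  · show (-(ifib i) + ifib (i+2)) * (-(ifib i) - ifib (i+2)) = -(ifib (2*i+2))
    rw [e1, h2]; ring
  · show ifib (i+2) * (2 * -(ifib i) + 3 * ifib (i+2)) = ifib (2*i+4)
    rw [e2, h3, h2]; ring

theorem stepA0_one (i : Nat) :
    fibfuscStepA 0 (-(ifib i), ifib (i+2)) '1' = (-(ifib (2*i+4)), ifib (2*i+6)) := by
  have h2 : ifib (i+2) = ifib i + ifib (i+1) := ifib_add_two i
  have h3 : ifib (i+3) = ifib (i+1) + ifib (i+2) := ifib_add_two (i+1)
  have h4 : ifib (i+4) = ifib (i+2) + ifib (i+3) := ifib_add_two (i+2)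
  have e2 : ifib (2*i+4) = ifib (i+1) * ifib (i+2) + ifib (i+2) * ifib (i+3) := by
    have h := ifib_add (i+1) (i+2); rw [show (i+1) + (i+2) + 1 = 2*i+4 from by ring] at h
    simpa [show i+1+1 = i+2 from rfl, show i+2+1 = i+3 from rfl] using h
  have e3 : ifib (2*i+6) = ifib (i+2) * ifib (i+3) + ifib (i+3) * ifib (i+4) := by
    have h := ifib_add (i+2) (i+3); rw [show (i+2) + (i+3) + 1 = 2*i+6 from by ring] at h
    simpa [show i+2+1 = i+3 from rfl, show i+3+1 = i+4 from rfl] using h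
  simp only [fibfuscStepA, ne_eq, not_true_eq_false, if_false]
  rw [if_neg (by decide : ¬(('1' : Char) == '0') = true)]
  refine Prod.ext ?_ ?_
  · show -(ifib (i+2)) * (2 * -(ifib i) + 3 * ifib (i+2)) = -(ifib (2*i+4))
    rw [e2, h3, h2]; ring
  · show (-(ifib i) + 2 * ifib (i+2)) * (-(ifib i) + 4 * ifib (i+2)) = ifib (2*i+6)
    rw [e3, h4, h3, h2]; ring

-- the loop body with modulus: reduce the input first, the output is reduced
theorem stepA_mod (m : Int) (hm : 0 < m) (A B : Int) (c : Char) :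
    fibfuscStepA m (A % m, B % m) c = ((fibfuscStepA 0 (A, B) c).1 % m, (fibfuscStepA 0 (A, B) c).2 % m) := by
  have hmne : m ≠ 0 := by omega
  have ha : (A % m) ≡ A [ZMOD m] := emod_self_modeq A m
  have hb : (B % m) ≡ B [ZMOD m] := emod_self_modeq B m
  simp only [fibfuscStepA, ne_eq, hmne, not_false_eq_true, if_true, not_true_eq_false, if_false]
  by_cases hc : (c == '0') = true
  · simp only [hc, if_true]
    refine Prod.ext ?_ ?_
    · show PySem.Int.mod ((A % m + B % m) * (A % m - B % m)) m = (A + B) * (A - B) % m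
      rw [pymod_emod hm]; exact (ha.add hb).mul (ha.sub hb)
    · show PySem.Int.mod ((B % m) * (2*(A % m) + 3*(B % m))) m = B * (2*A + 3*B) % m
      rw [pymod_emod hm]; exact hb.mul (((Int.ModEq.refl 2).mul ha).add ((Int.ModEq.refl 3).mul hb))
  · simp only [hc, if_false]
    refine Prod.ext ?_ ?_
    · show PySem.Int.mod (-(B % m) * (2*(A % m) + 3*(B % m))) m = -B * (2*A + 3*B) % m
      rw [pymod_emod hm]; exact (hb.neg).mul (((Int.ModEq.refl 2).mul ha).add ((Int.ModEq.refl 3).mul hb))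
    · show PySem.Int.mod ((A % m + 2*(B % m)) * (A % m + 4*(B % m))) m = (A + 2*B) * (A + 4*B) % m
      rw [pymod_emod hm]
      exact (ha.add ((Int.ModEq.refl 2).mul hb)).mul (ha.add ((Int.ModEq.refl 4).mul hb))

-- A's loop, exact: processing the low bits of k+1 yields (-F(2k), F(2k+2))
theorem foldA_exact : ∀ k, (fibfuscBits (k+1)).foldl (fibfuscStepA 0) (0, 1) = (-(ifib (2*k)), ifib (2*k+2)) := by
  intro k
  induction k using Nat.strong_induction_on with
  | _ k ih =>
    by_cases h0 : k = 0
    · subst h0; rw [fibfuscBits]; simp [ifib_zero, ifib_two]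
    · have h2 : ¬ (k + 1 < 2) := by omega
      rw [fibfuscBits, dif_neg h2, List.foldl_append]
      obtain ⟨j, hj⟩ : ∃ j, (k+1)/2 = j + 1 := ⟨(k+1)/2 - 1, by omega⟩
      rw [hj, ih j (by omega)]
      simp only [List.foldl_cons, List.foldl_nil]
      rcases Nat.even_or_odd (k+1) with ⟨i, hi⟩ | ⟨i, hi⟩
      · have hji : j = i - 1 ∧ 1 ≤ i := by omega
        have hmod : ((k+1) % 2 == 1) = false := by
          have : k + 1 = 2 * i := by omega
          rw [this]; simp [Nat.mul_mod_right]
        simp only [hmod, Bool.false_eq_true, if_false]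
        rw [stepA0_zero (2*j)]
        have h1 : 2*(2*j)+2 = 2*k := by omega
        have h2' : 2*(2*j)+4 = 2*k+2 := by omega
        rw [h1, h2']
      · have hmod : ((k+1) % 2 == 1) = true := by
          have : k + 1 = 2 * i + 1 := by omega
          rw [this]; simp [Nat.add_mul_mod_self_left]
        rw [hmod]
        simp only [if_true]
        rw [stepA0_one (2*j)]
        have h1 : 2*(2*j)+4 = 2*k := by omega
        have h2' : 2*(2*j)+6 = 2*k+2 := by omega
        rw [h1, h2']

-- A's loop with modulus m ≥ 2: the reduced invariant
theorem foldA_mod {m : Int} (hm : 2 ≤ m) :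
    ∀ k, (fibfuscBits (k+1)).foldl (fibfuscStepA m) (0, 1) = ((-(ifib (2*k))) % m, ifib (2*k+2) % m) := by
  have hm0 : (0:Int) < m := by omega
  intro k
  induction k using Nat.strong_induction_on with
  | _ k ih =>
    by_cases h0 : k = 0
    · subst h0; rw [fibfuscBits]
      simp [ifib_zero, ifib_two, one_emod_eq_one hm]
    · have h2 : ¬ (k + 1 < 2) := by omega
      rw [fibfuscBits, dif_neg h2, List.foldl_append]
      obtain ⟨j, hj⟩ : ∃ j, (k+1)/2 = j + 1 := ⟨(k+1)/2 - 1, by omega⟩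
      rw [hj, ih j (by omega)]
      simp only [List.foldl_cons, List.foldl_nil]
      rw [stepA_mod m hm0]
      rcases Nat.even_or_odd (k+1) with ⟨i, hi⟩ | ⟨i, hi⟩
      · have hmod : ((k+1) % 2 == 1) = false := by
          have : k + 1 = 2 * i := by omega
          rw [this]; simp [Nat.mul_mod_right]
        simp only [hmod, Bool.false_eq_true, if_false]
        rw [stepA0_zero (2*j)]
        have h1 : 2*(2*j)+2 = 2*k := by omega
        have h2' : 2*(2*j)+4 = 2*k+2 := by omega
        rw [h1, h2']
      · have hmod : ((k+1) % 2 == 1) = true := by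
          have : k + 1 = 2 * i + 1 := by omega
          rw [this]; simp [Nat.add_mul_mod_self_left]
        rw [hmod]
        simp only [if_true]
        rw [stepA0_one (2*j)]
        have h1 : 2*(2*j)+4 = 2*k := by omega
        have h2' : 2*(2*j)+6 = 2*k+2 := by omega
        rw [h1, h2']

-- ===== VERDICT (by name: the statement is the Claim_ definition above) =====
theorem fibfusc_spec : Claim_equal_fibfusc := by
  intro n d _hdom hpre
  unfold Spec_fibfusc fibfusc fibfusc_alt
  by_cases hneg : n < 0
  · simp [hneg]
  by_cases h0 : n = 0
  · simp [h0]
  replace hpre : ∀ dv, d = some dv → 0 ≤ dv := by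
    rcases hpre with h | h
    · omega
    · exact h
  generalize hmg : (match d with
      | none => (0:Int)
      | some dv => if dv ≠ 0 then 10 ^ dv.toNat else 0) = m
  have hm_cases : m = 0 ∨ 2 ≤ m := by
    rcases d with _ | dv
    · exact Or.inl hmg.symm
    · by_cases hdv : dv = 0
      · left; rw [← hmg]
        show (if dv ≠ 0 then (10:Int) ^ dv.toNat else 0) = 0
        simp [hdv]
      · right
        rw [← hmg]
        show 2 ≤ (if dv ≠ 0 then (10:Int) ^ dv.toNat else 0)
        rw [if_pos hdv]
        have h1 : 1 ≤ dv.toNat := by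
          have := hpre dv rfl
          omega
        calc (2:Int) ≤ 10 ^ 1 := by norm_num
          _ ≤ 10 ^ dv.toNat := pow_le_pow_right₀ (by norm_num) h1
  clear hmg hpre _hdom
  by_cases h1 : n = 1
  · -- A returns (0,1) directly; B computes fibfuscFib2 m 0 = (0,1)
    subst h1
    have ht : ((2:Int)*1 - 2).toNat = 0 := by decide
    rw [if_neg hneg, if_neg h0, if_pos rfl, if_neg hneg, if_neg h0, ht]
    dsimp only
    rcases hm_cases with hm | hm
    · subst hm
      rw [fib2_exact 0]
      simp [ifib_zero, ifib_one]
    · have hm0 : (0:Int) < m := by omega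
      have hmne : m ≠ 0 := by omega
      rw [fib2_mod hm 0]
      simp only [ifib_zero, ifib_one, ne_eq, hmne, not_false_eq_true, if_true]
      simp [pymod_emod hm0, ifib, Nat.fib_one, one_emod_eq_one hm]
  · -- n ≥ 2
    have hn2 : 2 ≤ n := by omega
    rw [if_neg hneg, if_neg h0, if_neg h1, if_neg hneg, if_neg h0]
    dsimp only
    obtain ⟨k, hk⟩ : ∃ k, n.toNat = k + 1 := ⟨n.toNat - 1, by omega⟩
    have hk1 : 1 ≤ k := by omega
    have ht : ((2:Int)*n - 2).toNat = 2*k := by omega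
    rw [hk, ht]
    rcases hm_cases with hm | hm
    · subst hm
      rw [foldA_exact k, fib2_exact (2*k)]
      simp only [ne_eq, not_true_eq_false, if_false]
      refine Prod.ext rfl ?_
      show ifib (2*k+2) = ifib (2*k) + ifib (2*k+1)
      exact ifib_add_two (2*k)
    · have hm0 : (0:Int) < m := by omega
      have hmne : m ≠ 0 := by omega
      rw [foldA_mod hm k, fib2_mod hm (2*k)]
      simp only [ne_eq, hmne, not_false_eq_true, if_true]
      set P := ifib (2*k) with hP
      set Q := ifib (2*k+1) with hQ
      have hx : PySem.Int.mod ((-P) % m) m = (-P) % m := by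
        rw [pymod_emod hm0, Int.emod_emod_of_dvd _ dvd_rfl]
      have hy : PySem.Int.mod (ifib (2*k+2) % m) m = ifib (2*k+2) % m := by
        rw [pymod_emod hm0, Int.emod_emod_of_dvd _ dvd_rfl]
      have hx2 : PySem.Int.mod (-(P % m)) m = (-P) % m := by
        rw [pymod_emod hm0]; exact (emod_self_modeq P m).neg
      have hy2 : PySem.Int.mod (P % m + Q % m) m = ifib (2*k+2) % m := by
        rw [pymod_emod hm0, ifib_add_two (2*k)]
        exact (emod_self_modeq P m).add (emod_self_modeq Q m)
      rw [hx, hy, hx2, hy2]
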